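-- pv_equiv track=rewrite | github.com/camilosjobergtala/AFH-MODEL | ECLIPSE DE SOL.py | clasificar_singularidades_unico
-- ===== SOURCE A (Python) =====
-- def clasificar_singularidades_unico(singularidad_idx, despertares, dormidas, ventana_margin=2):
--     trans_all = [(i, "convergente") for i in despertares] + [(i, "divergente") for i in dormidas]
--     trans_all = sorted(trans_all, key=lambda x: x[0])
--     singularidad_tipo = {}
--     for idx in singularidad_idx:
--         closest = min(trans_all, key=lambda x: abs(idx-x[0]), default=None)
--         if closest and abs(closest[0]-idx) <= ventana_margin:
--             singularidad_tipo[idx] = closest[1]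
--         else:
--             singularidad_tipo[idx] = "sin_clasificar"
--     return singularidad_tipo
-- ===== SOURCE B (Python) =====
-- import bisect
--
-- def clasificar_singularidades_unico(singularidad_idx, despertares, dormidas, ventana_margin=2):
--     trans = sorted([(v, "convergente") for v in despertares] +
--                    [(v, "divergente") for v in dormidas], key=lambda t: t[0])
--     vals = [t[0] for t in trans]
--     labels = [t[1] for t in trans]
--     resultado = {}
--     for idx in singularidad_idx:
--         j = bisect.bisect_left(vals, idx)
--         tipo = "sin_clasificar"
--         if j < len(vals) and vals[j] - idx <= ventana_margin and (j == 0 or idx - vals[j - 1] > vals[j] - idx):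
--             tipo = labels[j]
--         elif j > 0 and idx - vals[j - 1] <= ventana_margin:
--             tipo = labels[bisect.bisect_left(vals, vals[j - 1])]
--         resultado[idx] = tipo
--     return resultado
-- ===== Notes on version B (the rewrite author's own statement) =====
-- stated objective: faster
-- what changed: Instead of a linear min-by-distance scan over all transitions for every singularity, B sorts once, then binary-searches (bisect_left) the nearest left/right neighbour per singularity, reproducing min's first-of-the-sorted-list tie-break (left value wins on equal distance, first occurrence of a duplicated value wins) with a second bisect for the left label.
import Mathlib
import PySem

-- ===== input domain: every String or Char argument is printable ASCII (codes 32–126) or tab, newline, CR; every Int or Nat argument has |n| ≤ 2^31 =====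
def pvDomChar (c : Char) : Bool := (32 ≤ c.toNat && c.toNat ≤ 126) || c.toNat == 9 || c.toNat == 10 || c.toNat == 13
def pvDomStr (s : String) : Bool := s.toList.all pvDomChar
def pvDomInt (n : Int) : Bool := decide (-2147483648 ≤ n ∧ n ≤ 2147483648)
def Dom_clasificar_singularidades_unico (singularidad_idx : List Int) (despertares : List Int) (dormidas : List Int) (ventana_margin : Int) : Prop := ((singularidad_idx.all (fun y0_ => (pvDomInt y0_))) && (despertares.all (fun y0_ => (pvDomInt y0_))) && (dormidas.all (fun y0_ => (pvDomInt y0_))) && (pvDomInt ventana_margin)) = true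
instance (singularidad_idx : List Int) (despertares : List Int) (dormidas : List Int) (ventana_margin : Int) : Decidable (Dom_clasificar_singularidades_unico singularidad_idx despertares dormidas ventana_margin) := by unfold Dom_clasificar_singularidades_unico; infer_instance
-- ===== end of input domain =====

-- B replaces A's per-singularity linear min-by-distance scan over all transitions by one sort plus a
-- bisect (binary search) for the nearest left/right transition value per singularity (asymptotically faster).


-- ===== PORT A =====
-- per-singularity classification: min over all transitions by absolute distance, then margin check
def pvClasA (trans_all : List (Int × String)) (ventana_margin idx : Int) : String :=
  match PySem.List.min? trans_all (fun x => |idx - x.1|) with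
  | some closest => if |closest.1 - idx| ≤ ventana_margin then closest.2 else "sin_clasificar"
  | none => "sin_clasificar"

def clasificar_singularidades_unico (singularidad_idx : List Int) (despertares : List Int) (dormidas : List Int) (ventana_margin : Int) : List (Int × String) :=
  let trans_all := PySem.List.sorted
      (despertares.map (fun i => (i, "convergente")) ++ dormidas.map (fun i => (i, "divergente")))
      (fun x => x.1) false
  (singularidad_idx.foldl
      (fun (d : PySem.Dict Int String) idx => d.insert idx (pvClasA trans_all ventana_margin idx))
      PySem.Dict.empty).items

-- ===== PORT B =====
-- per-singularity classification: bisect to the nearest left/right transition value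
-- (bisect.bisect_left is ported as PySem.List.bisectLeft; guarded list indexing as getD)
def pvClasB (vals : List Int) (labels : List String) (ventana_margin idx : Int) : String :=
  let j := PySem.List.bisectLeft vals idx
  if j < vals.length ∧ vals.getD j 0 - idx ≤ ventana_margin ∧
      (j = 0 ∨ idx - vals.getD (j - 1) 0 > vals.getD j 0 - idx) then
    labels.getD j ""
  else if 0 < j ∧ idx - vals.getD (j - 1) 0 ≤ ventana_margin then
    labels.getD (PySem.List.bisectLeft vals (vals.getD (j - 1) 0)) ""
  else "sin_clasificar"

def clasificar_singularidades_unico_alt (singularidad_idx : List Int) (despertares : List Int) (dormidas : List Int) (ventana_margin : Int) : List (Int × String) :=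
  let trans := PySem.List.sorted
      (despertares.map (fun i => (i, "convergente")) ++ dormidas.map (fun i => (i, "divergente")))
      (fun x => x.1) false
  let vals := trans.map (fun t => t.1)
  let labels := trans.map (fun t => t.2)
  (singularidad_idx.foldl
      (fun (d : PySem.Dict Int String) idx => d.insert idx (pvClasB vals labels ventana_margin idx))
      PySem.Dict.empty).items

-- ===== PRECONDITION & SPEC =====
def Spec_clasificar_singularidades_unico (singularidad_idx : List Int) (despertares : List Int) (dormidas : List Int) (ventana_margin : Int) (out : List (Int × String)) : Prop := out = clasificar_singularidades_unico_alt singularidad_idx despertares dormidas ventana_margin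
instance (singularidad_idx : List Int) (despertares : List Int) (dormidas : List Int) (ventana_margin : Int) (out : List (Int × String)) : Decidable (Spec_clasificar_singularidades_unico singularidad_idx despertares dormidas ventana_margin out) := by unfold Spec_clasificar_singularidades_unico; infer_instance

-- ===== CLAIM (what is proved, stated in full; the proofs are below) =====
def Claim_equal_clasificar_singularidades_unico : Prop := ∀ (singularidad_idx : List Int) (despertares : List Int) (dormidas : List Int) (ventana_margin : Int), Dom_clasificar_singularidades_unico singularidad_idx despertares dormidas ventana_margin → Spec_clasificar_singularidades_unico singularidad_idx despertares dormidas ventana_margin (clasificar_singularidades_unico singularidad_idx despertares dormidas ventana_margin)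

-- ===== LEMMAS AND PROOFS =====

-- the foldl step of PySem.List.min?
def pvMinStep {α : Type} (key : α → Int) : Option α → α → Option α :=
  fun acc x => match acc with
    | none => some x
    | some m => if key x < key m then some x else some m

lemma pvMin?_eq_foldl {α : Type} (xs : List α) (key : α → Int) :
    PySem.List.min? xs key = xs.foldl (pvMinStep key) none := rfl

lemma pvMinKeep {α : Type} (key : α → Int) (m : α) (suf : List α)
    (h : ∀ y ∈ suf, key m ≤ key y) :
    suf.foldl (pvMinStep key) (some m) = some m := by
  induction suf with
  | nil => rfl
  | cons y t ih =>
    have hy : ¬ key y < key m := not_lt.2 (h y (List.mem_cons_self ..))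
    simp only [List.foldl_cons, pvMinStep, hy, if_false]
    exact ih (fun z hz => h z (List.mem_cons_of_mem _ hz))

lemma pvMin?_first {α : Type} (key : α → Int) (pre suf : List α) (m : α)
    (h1 : ∀ y ∈ pre, key m < key y) (h2 : ∀ y ∈ suf, key m ≤ key y) :
    PySem.List.min? (pre ++ m :: suf) key = some m := by
  rw [pvMin?_eq_foldl, List.foldl_append]
  have hpre : pre.foldl (pvMinStep key) none = none ∨
      ∃ p ∈ pre, pre.foldl (pvMinStep key) none = some p := by
    rcases h : PySem.List.min? pre key with _ | p
    · exact Or.inl (by rw [pvMin?_eq_foldl] at h; exact h)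
    · exact Or.inr ⟨p, PySem.List.min?_mem h, by rw [pvMin?_eq_foldl] at h; exact h⟩
  rcases hpre with h0 | ⟨p, hp, h0⟩
  · rw [h0]
    simp only [List.foldl_cons, pvMinStep]
    exact pvMinKeep key m suf h2
  · rw [h0]
    simp only [List.foldl_cons, pvMinStep, if_pos (h1 p hp)]
    exact pvMinKeep key m suf h2

-- first-extremal characterisation by index
lemma pvMin?_first_idx (ts : List (Int × String)) (key : Int × String → Int) (w : Nat)
    (hw : w < ts.length)
    (h1 : ∀ i (hi : i < ts.length), i < w → key ts[w] < key ts[i])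
    (h2 : ∀ i (hi : i < ts.length), w ≤ i → key ts[w] ≤ key ts[i]) :
    PySem.List.min? ts key = some ts[w] := by
  have hdecomp : ts = ts.take w ++ ts[w] :: ts.drop (w + 1) := by
    conv_lhs => rw [← List.take_append_drop w ts]
    rw [List.getElem_cons_drop]
  have hmain : PySem.List.min? (ts.take w ++ ts[w] :: ts.drop (w + 1)) key = some ts[w] := by
    apply pvMin?_first
    · intro y hy
      obtain ⟨i, hi, rfl⟩ := List.getElem_of_mem hy
      have hiw : i < w := lt_of_lt_of_le hi (by simp [List.length_take])
      rw [List.getElem_take]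
      exact h1 i (lt_trans hiw hw) hiw
    · intro y hy
      obtain ⟨i, hi, rfl⟩ := List.getElem_of_mem hy
      rw [List.getElem_drop]
      have hlen : w + 1 + i < ts.length := by
        have := hi
        simp only [List.length_drop] at this
        omega
      exact h2 (w + 1 + i) hlen (by omega)
  rw [← hdecomp] at hmain
  exact hmain

lemma pvClasA_some (ts : List (Int × String)) (vm idx : Int) (c : Int × String)
    (h : PySem.List.min? ts (fun x => |idx - x.1|) = some c) :
    pvClasA ts vm idx = if |c.1 - idx| ≤ vm then c.2 else "sin_clasificar" := by
  unfold pvClasA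
  rw [h]

lemma pvClasA_none (ts : List (Int × String)) (vm idx : Int)
    (h : PySem.List.min? ts (fun x => |idx - x.1|) = none) :
    pvClasA ts vm idx = "sin_clasificar" := by
  unfold pvClasA
  rw [h]

lemma pvClasB_def (vals : List Int) (labels : List String) (vm idx : Int) :
    pvClasB vals labels vm idx =
      (if PySem.List.bisectLeft vals idx < vals.length ∧
            vals.getD (PySem.List.bisectLeft vals idx) 0 - idx ≤ vm ∧
            (PySem.List.bisectLeft vals idx = 0 ∨
              idx - vals.getD (PySem.List.bisectLeft vals idx - 1) 0 >
                vals.getD (PySem.List.bisectLeft vals idx) 0 - idx) then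
        labels.getD (PySem.List.bisectLeft vals idx) ""
      else if 0 < PySem.List.bisectLeft vals idx ∧
            idx - vals.getD (PySem.List.bisectLeft vals idx - 1) 0 ≤ vm then
        labels.getD (PySem.List.bisectLeft vals
          (vals.getD (PySem.List.bisectLeft vals idx - 1) 0)) ""
      else "sin_clasificar") := rfl

-- core per-singularity equality on a list sorted by first component
lemma pvCore_eq (ts : List (Int × String)) (hs : ts.Pairwise (fun a b => a.1 ≤ b.1))
    (vm idx : Int) :
    pvClasA ts vm idx = pvClasB (ts.map (fun t => t.1)) (ts.map (fun t => t.2)) vm idx := by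
  set vals := ts.map (fun t => t.1) with hvals
  set labels := ts.map (fun t => t.2) with hlabels
  have hn : vals.length = ts.length := by simp [hvals]
  have hln : labels.length = ts.length := by simp [hlabels]
  have hvget : ∀ (i : Nat) (hi : i < ts.length), vals.getD i 0 = ts[i].1 := by
    intro i hi
    rw [List.getD_eq_getElem vals 0 (by omega)]
    simp [hvals]
  have hlget : ∀ (i : Nat) (hi : i < ts.length), labels.getD i "" = ts[i].2 := by
    intro i hi
    rw [List.getD_eq_getElem labels "" (by omega)]
    simp [hlabels]
  have hvp : vals.Pairwise (· ≤ ·) := by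
    rw [hvals]; exact List.pairwise_map.mpr hs
  have hmono : ∀ (i k : Nat), i ≤ k → k < ts.length → vals.getD i 0 ≤ vals.getD k 0 := by
    intro i k hik hk
    rcases eq_or_lt_of_le hik with rfl | hlt'
    · exact le_refl _
    · have h := (List.pairwise_iff_getElem.mp hs) i k (by omega) hk hlt'
      rw [hvget i (by omega), hvget k hk]
      exact h
  obtain ⟨hj_le, hj_lt, hj_ge⟩ := PySem.List.bisectLeft_spec vals idx hvp
  set j := PySem.List.bisectLeft vals idx with hj
  have hjle : j ≤ ts.length := by omega
  have hlt : ∀ i : Nat, i < j → vals.getD i 0 < idx := by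
    intro i hij
    have hi : i < vals.length := by omega
    have h := hj_lt i hi hij
    rw [List.getD_eq_getElem vals 0 hi]
    exact h
  have hge : ∀ i : Nat, j ≤ i → i < ts.length → idx ≤ vals.getD i 0 := by
    intro i hji hi
    have hi' : i < vals.length := by omega
    have h := hj_ge i hi' hji
    rw [List.getD_eq_getElem vals 0 hi']
    exact h
  have habs1 : ∀ a : Int, idx ≤ a → |idx - a| = a - idx := by
    intro a h
    rw [abs_of_nonpos (by omega)]; ring
  have habs2 : ∀ a : Int, a ≤ idx → |idx - a| = idx - a := by
    intro a h
    exact abs_of_nonneg (by omega)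
  have hkey : ∀ (i : Nat) (hi : i < ts.length), |idx - ts[i].1| = |idx - vals.getD i 0| := by
    intro i hi
    rw [hvget i hi]
  rw [pvClasB_def, ← hj]
  by_cases hC1 : j < vals.length ∧ vals.getD j 0 - idx ≤ vm ∧
      (j = 0 ∨ idx - vals.getD (j - 1) 0 > vals.getD j 0 - idx)
  · rw [if_pos hC1]
    obtain ⟨hjlt', hA2, hA3⟩ := hC1
    have hjn : j < ts.length := by omega
    have hgej : idx ≤ vals.getD j 0 := hge j (le_refl j) hjn
    have hmin : PySem.List.min? ts (fun x => |idx - x.1|) = some ts[j] := by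
      apply pvMin?_first_idx ts _ j hjn
      · intro i hi hij
        dsimp only
        rw [hkey j hjn, hkey i hi, habs1 _ hgej, habs2 _ (le_of_lt (hlt i hij))]
        have hj0 : j ≠ 0 := by omega
        rcases hA3 with h0 | h3
        · exact absurd h0 hj0
        · have := hmono i (j - 1) (by omega) (by omega)
          omega
      · intro i hi hji
        dsimp only
        rw [hkey j hjn, hkey i hi, habs1 _ hgej, habs1 _ (hge i hji hi)]
        have := hmono j i hji hi
        omega
    rw [pvClasA_some ts vm idx ts[j] hmin]
    rw [if_pos (by rw [← hvget j hjn, abs_sub_comm, habs1 _ hgej]; exact hA2)]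
    exact (hlget j hjn).symm
  · rw [if_neg hC1]
    by_cases hC2 : 0 < j ∧ idx - vals.getD (j - 1) 0 ≤ vm
    · rw [if_pos hC2]
      obtain ⟨hj0, hB2⟩ := hC2
      have hj1n : j - 1 < ts.length := by omega
      have hxlt : vals.getD (j - 1) 0 < idx := hlt (j - 1) (by omega)
      obtain ⟨hk_le, hk_lt, hk_ge⟩ := PySem.List.bisectLeft_spec vals (vals.getD (j - 1) 0) hvp
      set j0 := PySem.List.bisectLeft vals (vals.getD (j - 1) 0) with hj0def
      have hj0le : j0 ≤ j - 1 := by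
        by_contra hcon
        have h := hk_lt (j - 1) (by omega) (by omega)
        rw [List.getD_eq_getElem vals 0 (by omega)] at h
        exact absurd h (lt_irrefl _)
      have hj0n : j0 < ts.length := by omega
      have hvj0 : vals.getD j0 0 = vals.getD (j - 1) 0 := by
        have hj0v : j0 < vals.length := by omega
        have h1 := hk_ge j0 hj0v (le_refl j0)
        have h2 := hmono j0 (j - 1) hj0le hj1n
        rw [List.getD_eq_getElem vals 0 hj0v] at h2 ⊢
        omega
      have hxle : vals.getD j0 0 < idx := by rw [hvj0]; exact hxlt
      have hmargin : ∀ i : Nat, j ≤ i → i < ts.length →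
          idx - vals.getD (j - 1) 0 ≤ vals.getD i 0 - idx := by
        intro i hji hi
        have hjn : j < ts.length := by omega
        have hmi := hmono j i hji hi
        have hcase : vm < vals.getD j 0 - idx ∨
            (¬ j = 0 ∧ idx - vals.getD (j - 1) 0 ≤ vals.getD j 0 - idx) := by
          by_cases hA2 : vals.getD j 0 - idx ≤ vm
          · right
            constructor
            · omega
            · by_contra hcon
              exact hC1 ⟨by omega, hA2, Or.inr (by omega)⟩
          · left; omega
        rcases hcase with h | ⟨_, h⟩
        · omega
        · omega
      have hmin : PySem.List.min? ts (fun x => |idx - x.1|) = some ts[j0] := by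
        apply pvMin?_first_idx ts _ j0 hj0n
        · intro i hi hij0
          dsimp only
          have hvi : vals.getD i 0 < vals.getD (j - 1) 0 := by
            rw [List.getD_eq_getElem vals 0 (show i < vals.length by omega)]
            exact hk_lt i (by omega) hij0
          rw [hkey j0 hj0n, hkey i hi, habs2 _ (le_of_lt hxle),
              habs2 _ (le_of_lt (lt_trans hvi hxlt)), hvj0]
          omega
        · intro i hi hj0i
          dsimp only
          rw [hkey j0 hj0n, hkey i hi, habs2 _ (le_of_lt hxle), hvj0]
          by_cases hij : i < j
          · have h1 := hmono j0 i hj0i hi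
            have h2 := hmono i (j - 1) (by omega) hj1n
            rw [habs2 _ (le_of_lt (hlt i hij))]
            omega
          · have h := hmargin i (by omega) hi
            rw [habs1 _ (hge i (by omega) hi)]
            omega
      rw [pvClasA_some ts vm idx ts[j0] hmin]
      rw [if_pos (by
        rw [← hvget j0 hj0n, abs_sub_comm, habs2 _ (le_of_lt hxle), hvj0]; exact hB2)]
      exact (hlget j0 hj0n).symm
    · rw [if_neg hC2]
      rcases hmin : PySem.List.min? ts (fun x => |idx - x.1|) with _ | m
      · exact pvClasA_none ts vm idx hmin
      · rw [pvClasA_some ts vm idx m hmin]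
        obtain ⟨i, hi, hieq⟩ := List.getElem_of_mem (PySem.List.min?_mem hmin)
        have hbig : vm < |idx - vals.getD i 0| := by
          by_cases hij : i < j
          · have hj0 : 0 < j := by omega
            have hvm : vm < idx - vals.getD (j - 1) 0 := by
              by_contra hcon
              exact hC2 ⟨hj0, by omega⟩
            rw [habs2 _ (le_of_lt (hlt i hij))]
            have := hmono i (j - 1) (by omega) (by omega)
            omega
          · have hjn : j < ts.length := by omega
            have hgei := hge i (by omega) hi
            have hmi := hmono j i (by omega) hi
            rw [habs1 _ hgei]
            by_cases hA2 : vm < vals.getD j 0 - idx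
            · omega
            · have h3 : ¬ j = 0 ∧ idx - vals.getD (j - 1) 0 ≤ vals.getD j 0 - idx := by
                constructor
                · intro h0
                  have := hge i (by omega) hi
                  exact hC1 ⟨by omega, by omega, Or.inl h0⟩
                · by_contra hcon
                  exact hC1 ⟨by omega, by omega, Or.inr (by omega)⟩
              have hvm : vm < idx - vals.getD (j - 1) 0 := by
                by_contra hcon
                exact hC2 ⟨by omega, by omega⟩
              omega
        have hne : ¬ |m.1 - idx| ≤ vm := by
          have h2 : |m.1 - idx| = |idx - vals.getD i 0| := by
            rw [abs_sub_comm, ← hieq, hkey i hi]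
          omega
        rw [if_neg hne]

-- ===== VERDICT (by name: the statement is the Claim_ definition above) =====
theorem clasificar_singularidades_unico_spec : Claim_equal_clasificar_singularidades_unico := by
  intro si dp dm vm _
  unfold Spec_clasificar_singularidades_unico clasificar_singularidades_unico clasificar_singularidades_unico_alt
  have hcore : ∀ idx : Int,
      pvClasA (PySem.List.sorted (dp.map (fun i => (i, "convergente")) ++ dm.map (fun i => (i, "divergente"))) (fun x => x.1) false) vm idx
      = pvClasB ((PySem.List.sorted (dp.map (fun i => (i, "convergente")) ++ dm.map (fun i => (i, "divergente"))) (fun x => x.1) false).map (fun t => t.1))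
                ((PySem.List.sorted (dp.map (fun i => (i, "convergente")) ++ dm.map (fun i => (i, "divergente"))) (fun x => x.1) false).map (fun t => t.2)) vm idx := by
    intro idx
    exact pvCore_eq _ (PySem.List.sorted_pairwise ..) vm idx
  simp only [hcore]
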